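-- pv_equiv track=rewrite | github.com/SlackinJack/poc | modules/util/util.py | trimTextBySentenceLength
-- ===== SOURCE A (Python) =====
-- def trimTextBySentenceLength(textIn, maxLength):
--     i = 0               # char position
--     j = 0               # sentences
--     k = 0               # chars since last sentence
--     flag = False        # deleted a "short" sentence this run
--     m = 24              # "short" sentence chars threshold
--     for char in textIn:
--         i += 1
--         k += 1
--         if (("!" == char) or ("?" == char) or ("." == char and (
--             not textIn[i - 1].isnumeric() or (
--                 i + 1 <= len(textIn) - 1 and not textIn[i + 1].isnumeric()
--             )
--         ))):
--             j += 1
--             if k < m and not flag: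
--                 j -= 1
--                 flag = True
--             if j == maxLength:
--                 return textIn[0:i]
--             k = 0
--             flag = False
--     return textIn
-- ===== SOURCE B (Python) =====
-- def trimTextBySentenceLength(textIn, maxLength):
--     # Pass 1: record each sentence boundary as (prefix_length, segment_length).
--     boundaries = []
--     seg = 0
--     pos = 0
--     for ch in textIn:
--         pos += 1
--         seg += 1
--         if ch in "!?.":
--             boundaries.append((pos, seg))
--             seg = 0
--     # Pass 2: count sentences of >= 24 chars; cut when the count hits maxLength.
--     j = 0
--     for prefix, seglen in boundaries:
--         if seglen >= 24:
--             j += 1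
--         if j == maxLength:
--             return textIn[:prefix]
--     return textIn
-- ===== Notes on version B (the rewrite author's own statement) =====
-- stated objective: simpler
-- what changed: B replaces A's single stateful loop (with its dead isnumeric() test on the boundary char itself and the self-cancelling 'flag' branch) by two plain passes: one pass collecting (prefix_length, segment_length) sentence-boundary records, then a scan counting segments of >= 24 chars and cutting at maxLength.
import Mathlib
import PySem

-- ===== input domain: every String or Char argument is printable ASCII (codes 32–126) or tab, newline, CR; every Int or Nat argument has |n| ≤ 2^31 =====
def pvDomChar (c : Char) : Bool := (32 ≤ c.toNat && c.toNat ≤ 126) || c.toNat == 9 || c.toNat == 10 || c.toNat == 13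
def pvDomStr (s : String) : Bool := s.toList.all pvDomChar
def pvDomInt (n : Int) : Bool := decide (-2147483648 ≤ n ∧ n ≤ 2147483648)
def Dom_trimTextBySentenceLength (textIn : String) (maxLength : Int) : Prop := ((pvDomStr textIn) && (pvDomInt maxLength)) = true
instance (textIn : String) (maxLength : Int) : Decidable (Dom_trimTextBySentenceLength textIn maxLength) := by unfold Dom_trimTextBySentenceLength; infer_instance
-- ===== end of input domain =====

-- B replaces A's single stateful loop by two passes: collect sentence-boundary records, then count and cut (simpler; return value only, no side effects involved).

-- ===== PORT A =====
-- Python str.isnumeric() of a single char: on the ASCII domain it coincides with isdigit.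
def pyIsNumericChar (c : Char) : Bool := c.isDigit

def trimTextA_go (textIn : String) (maxLength : Int) : List Char → Int → Int → Int → Bool → String
  | [], _, _, _, _ => textIn
  | ch :: rest, i, j, k, flag =>
    let full := textIn.toList
    let i' := i + 1
    let k' := k + 1
    if ch = '!' ∨ ch = '?' ∨ (ch = '.' ∧
        (¬ pyIsNumericChar ((PySem.List.pyGet? full (i' - 1)).getD ' ') ∨
          (i' + 1 ≤ (full.length : Int) - 1 ∧
            ¬ pyIsNumericChar ((PySem.List.pyGet? full (i' + 1)).getD ' ')))) then
      let j1 := j + 1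
      let jf := if k' < 24 ∧ flag = false then (j1 - 1, true) else (j1, flag)
      if jf.1 = maxLength then String.ofList (PySem.List.slice full (some 0) (some i'))
      else trimTextA_go textIn maxLength rest i' jf.1 0 false
    else trimTextA_go textIn maxLength rest i' j k' flag

def trimTextBySentenceLength (textIn : String) (maxLength : Int) : String :=
  trimTextA_go textIn maxLength textIn.toList 0 0 0 false

-- ===== PORT B =====
-- pass 1 step: state = (boundaries, seg, pos)
def trimTextB_step (st : List (Int × Int) × Int × Int) (ch : Char) : List (Int × Int) × Int × Int :=
  let pos := st.2.2 + 1
  let seg := st.2.1 + 1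
  if ch = '!' ∨ ch = '?' ∨ ch = '.' then (st.1 ++ [(pos, seg)], 0, pos)
  else (st.1, seg, pos)

-- pass 2: count segments of >= 24 chars, cut at maxLength
def trimTextB_cut (textIn : String) (maxLength : Int) : List (Int × Int) → Int → String
  | [], _ => textIn
  | (pre, seglen) :: rest, j =>
    let j' := if 24 ≤ seglen then j + 1 else j
    if j' = maxLength then String.ofList (PySem.List.slice textIn.toList none (some pre))
    else trimTextB_cut textIn maxLength rest j'

def trimTextBySentenceLength_alt (textIn : String) (maxLength : Int) : String :=
  trimTextB_cut textIn maxLength ((textIn.toList.foldl trimTextB_step ([], 0, 0)).1) 0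

-- ===== PRECONDITION & SPEC =====
def Spec_trimTextBySentenceLength (textIn : String) (maxLength : Int) (out : String) : Prop := out = trimTextBySentenceLength_alt textIn maxLength
instance (textIn : String) (maxLength : Int) (out : String) : Decidable (Spec_trimTextBySentenceLength textIn maxLength out) := by unfold Spec_trimTextBySentenceLength; infer_instance

-- ===== CLAIM (what is proved, stated in full; the proofs are below) =====
def Claim_equal_trimTextBySentenceLength : Prop := ∀ (textIn : String) (maxLength : Int), Dom_trimTextBySentenceLength textIn maxLength → Spec_trimTextBySentenceLength textIn maxLength (trimTextBySentenceLength textIn maxLength)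

-- ===== LEMMAS AND PROOFS =====

-- proof-side recursive form of B's first pass
def pvBnd : List Char → Int → Int → List (Int × Int)
  | [], _, _ => []
  | c :: rest, pos, k =>
    if c = '!' ∨ c = '?' ∨ c = '.' then (pos + 1, k + 1) :: pvBnd rest (pos + 1) 0
    else pvBnd rest (pos + 1) (k + 1)

theorem foldl_step_eq_bnd (cs : List Char) : ∀ (acc : List (Int × Int)) (k pos : Int),
    (cs.foldl trimTextB_step (acc, k, pos)).1 = acc ++ pvBnd cs pos k := by
  induction cs with
  | nil => intro acc k pos; simp [pvBnd]
  | cons c rest ih =>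
    intro acc k pos
    simp only [List.foldl_cons, trimTextB_step, pvBnd]
    split
    · rw [ih]; simp
    · rw [ih]

theorem trimTextA_go_eq (textIn : String) (ml : Int) (cs : List Char) :
    ∀ (n : Nat) (j k : Int), cs = textIn.toList.drop n →
    trimTextA_go textIn ml cs (n : Int) j k false =
      trimTextB_cut textIn ml (pvBnd cs (n : Int) k) j := by
  induction cs with
  | nil => intro n j k _; simp [trimTextA_go, pvBnd, trimTextB_cut]
  | cons c rest ih =>
    intro n j k h
    have hget : textIn.toList[n]? = some c := by
      rw [← List.head?_drop, ← h]; rfl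
    have hrest : rest = textIn.toList.drop (n + 1) := by
      rw [← List.tail_drop, ← h]; rfl
    have hcond : (c = '!' ∨ c = '?' ∨ (c = '.' ∧
        (¬ pyIsNumericChar ((PySem.List.pyGet? textIn.toList ((n : Int) + 1 - 1)).getD ' ') ∨
          ((n : Int) + 1 + 1 ≤ (textIn.toList.length : Int) - 1 ∧
            ¬ pyIsNumericChar ((PySem.List.pyGet? textIn.toList ((n : Int) + 1 + 1)).getD ' '))))) ↔
        (c = '!' ∨ c = '?' ∨ c = '.') := by
      constructor
      · rintro (h1 | h2 | ⟨h3, _⟩)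
        · exact Or.inl h1
        · exact Or.inr (Or.inl h2)
        · exact Or.inr (Or.inr h3)
      · rintro (h1 | h2 | h3)
        · exact Or.inl h1
        · exact Or.inr (Or.inl h2)
        · refine Or.inr (Or.inr ⟨h3, Or.inl ?_⟩)
          have he : ((n : Int) + 1 - 1) = ((n : Nat) : Int) := by ring
          rw [he, PySem.List.pyGet?_natCast, hget, h3]
          simp [pyIsNumericChar]
    have hn1 : ((n : Int) + 1) = (((n + 1 : Nat)) : Int) := by push_cast; ring
    by_cases hb : c = '!' ∨ c = '?' ∨ c = '.'
    · -- boundary character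
      simp only [trimTextA_go]
      rw [if_pos (hcond.mpr hb)]
      have hj : (if k + 1 < 24 ∧ True then (j + 1 - 1, true) else (j + 1, false)).1
          = (if 24 ≤ k + 1 then j + 1 else j) := by
        by_cases h1 : k + 1 < 24 <;> by_cases h2 : 24 ≤ k + 1 <;> simp [h1, h2] <;> omega
      rw [hj]
      rw [pvBnd, if_pos hb, trimTextB_cut]
      by_cases hm : (if 24 ≤ k + 1 then j + 1 else j) = ml
      · rw [if_pos hm, if_pos hm, PySem.List.slice_zero_start]
      · rw [if_neg hm, if_neg hm, hn1, ih (n + 1) _ 0 hrest]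
    · -- not a boundary character
      simp only [trimTextA_go]
      rw [if_neg ((not_congr hcond).mpr hb), pvBnd, if_neg hb, hn1,
        ih (n + 1) j (k + 1) hrest]

-- ===== VERDICT (by name: the statement is the Claim_ definition above) =====
theorem trimTextBySentenceLength_spec : Claim_equal_trimTextBySentenceLength := by
  intro textIn maxLength _
  unfold Spec_trimTextBySentenceLength trimTextBySentenceLength trimTextBySentenceLength_alt
  rw [foldl_step_eq_bnd textIn.toList [] 0 0, List.nil_append]
  exact trimTextA_go_eq textIn maxLength textIn.toList 0 0 0 (by simp)
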